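-- pv_equiv track=rewrite | github.com/BlackSatan/simulation-modeling-queue-theory | one_channel_limit.py | system_run
-- ===== SOURCE A (Python) =====
-- def find_exec_time(arrival_time, exec_arr):
--     last_exec = exec_arr[-1]
--     return max(arrival_time, last_exec[1])
--
-- def system_run(incoming_dist, executing_dist, m):
--     result = []
--     time = 0
--     for index, inc in enumerate(incoming_dist):
--         exc = executing_dist[index]
--         if index == 0:
--             time += inc + exc
--             result.append([inc, inc + exc])
--         else:
--             arrival_time = sum(incoming_dist[:index])
--             start = find_exec_time(arrival_time, result)
--             queued_items_count = sum(list(map(lambda st: 1 if st[0] > arrival_time else 0, result)))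
--             if queued_items_count > m:
--                 continue
--             result.append([start, start + exc])
--     return result
-- ===== SOURCE B (Python) =====
-- def _bisect_right(a, x):
--     # verbatim CPython bisect.bisect_right (no key), hand-inlined since we may not import bisect
--     lo, hi = 0, len(a)
--     while lo < hi:
--         mid = (lo + hi) // 2
--         if x < a[mid]:
--             hi = mid
--         else:
--             lo = mid + 1
--     return lo
--
-- def system_run(incoming_dist, executing_dist, m):
--     # One pass with a running prefix sum for the arrival time and a sorted list of
--     # start times, so the per-step O(n) slice-sum and O(n) recount disappear.
--     result = []
--     starts = []      # start times of accepted items, kept sorted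
--     prefix = 0       # sum(incoming_dist[:index])
--     last_end = 0     # end time of the last accepted item
--     for index in range(len(incoming_dist)):
--         inc = incoming_dist[index]
--         exc = executing_dist[index]
--         if index == 0:
--             start = inc
--         else:
--             start = max(prefix, last_end)
--             # items with start time > arrival: they are still queued
--             if len(starts) - _bisect_right(starts, prefix) > m:
--                 prefix += inc
--                 continue
--         prefix += inc
--         result.append([start, start + exc])
--         last_end = start + exc
--         starts.insert(_bisect_right(starts, start), start)
--     return result
-- ===== Notes on version B (the rewrite author's own statement) =====
-- stated objective: faster
-- what changed: Instead of re-summing incoming_dist[:index] and re-counting the whole result list at every step, B keeps a running prefix sum, the last end time, and a sorted list of start times queried/updated with binary search (hand-inlined CPython bisect_right).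
import Mathlib
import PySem

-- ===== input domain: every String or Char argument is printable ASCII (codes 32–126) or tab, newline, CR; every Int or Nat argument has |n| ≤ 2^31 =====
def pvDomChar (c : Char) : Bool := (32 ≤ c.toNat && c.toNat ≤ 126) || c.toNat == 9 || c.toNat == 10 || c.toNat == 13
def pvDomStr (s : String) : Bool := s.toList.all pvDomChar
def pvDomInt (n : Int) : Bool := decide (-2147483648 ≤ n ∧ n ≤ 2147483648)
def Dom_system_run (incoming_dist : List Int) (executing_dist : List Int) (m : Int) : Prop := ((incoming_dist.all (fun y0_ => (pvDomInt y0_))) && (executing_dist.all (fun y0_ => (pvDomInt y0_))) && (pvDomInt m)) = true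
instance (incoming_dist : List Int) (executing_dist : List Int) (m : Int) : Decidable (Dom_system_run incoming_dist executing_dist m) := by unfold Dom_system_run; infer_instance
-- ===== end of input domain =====

-- B replaces A's per-step slice-sum and per-step recount of the result list by a running
-- prefix sum and a sorted list of start times queried with binary search (objective: faster).


-- ===== PORT A =====
def findExecTime (arrival_time : Int) (exec_arr : List (List Int)) : Int :=
  let last_exec := PySem.List.pyGetD exec_arr (-1) []   -- exec_arr[-1]; in-range on every reached call
  max arrival_time (PySem.List.pyGetD last_exec 1 0)

def aStep (incoming_dist executing_dist : List Int) (m : Int)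
    (st : Int × List (List Int)) (p : Int × Int) : Int × List (List Int) :=
  let time := st.1
  let result := st.2
  let index := p.1
  let inc := p.2
  let exc := PySem.List.pyGetD executing_dist index 0   -- executing_dist[index]; in range under Pre_
  if index = 0 then
    (time + (inc + exc), result ++ [[inc, inc + exc]])
  else
    let arrival_time := (PySem.List.slice incoming_dist none (some index)).sum
    let start := findExecTime arrival_time result
    let queued := (result.map (fun st0 => if PySem.List.pyGetD st0 0 0 > arrival_time then (1 : Int) else 0)).sum
    if queued > m then (time, result)
    else (time, result ++ [[start, start + exc]])

def system_run (incoming_dist : List Int) (executing_dist : List Int) (m : Int) : List (List Int) :=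
  ((PySem.List.enumerate incoming_dist).foldl (aStep incoming_dist executing_dist m) (0, [])).2

-- ===== PORT B =====
-- Source B's _bisect_right is verbatim CPython bisect_right: ported as PySem.List.bisectRight (exact);
-- list.insert is PySem.List.insert. State: (result, starts, prefix, last_end).
def bStep (incoming_dist executing_dist : List Int) (m : Int)
    (st : List (List Int) × List Int × Int × Int) (index : Int) :
    List (List Int) × List Int × Int × Int :=
  let result := st.1
  let starts := st.2.1
  let pref := st.2.2.1
  let last_end := st.2.2.2
  let inc := PySem.List.pyGetD incoming_dist index 0
  let exc := PySem.List.pyGetD executing_dist index 0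
  if index = 0 then
    (result ++ [[inc, inc + exc]],
     PySem.List.insert starts ((PySem.List.bisectRight starts inc : Nat) : Int) inc,
     pref + inc, inc + exc)
  else
    let start := max pref last_end
    if (starts.length : Int) - ((PySem.List.bisectRight starts pref : Nat) : Int) > m then
      (result, starts, pref + inc, last_end)   -- continue
    else
      (result ++ [[start, start + exc]],
       PySem.List.insert starts ((PySem.List.bisectRight starts start : Nat) : Int) start,
       pref + inc, start + exc)

def system_run_alt (incoming_dist : List Int) (executing_dist : List Int) (m : Int) : List (List Int) :=
  ((PySem.List.pyRange 0 (PySem.List.len incoming_dist)).foldl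
    (bStep incoming_dist executing_dist m) ([], [], 0, 0)).1

-- ===== PRECONDITION & SPEC =====
-- Pre_ excludes exactly the inputs where Python A raises IndexError: executing_dist shorter
-- than incoming_dist (A reads executing_dist[index] for every index of incoming_dist).
def Pre_system_run (incoming_dist : List Int) (executing_dist : List Int) (m : Int) : Prop :=
  incoming_dist.length ≤ executing_dist.length

instance (incoming_dist : List Int) (executing_dist : List Int) (m : Int) : Decidable (Pre_system_run incoming_dist executing_dist m) := by unfold Pre_system_run; infer_instance

def pvWitness_system_run : List Int × List Int × Int := ([2, 3, 1], [2, 1, 4], 1)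

def Spec_system_run (incoming_dist : List Int) (executing_dist : List Int) (m : Int) (out : List (List Int)) : Prop := out = system_run_alt incoming_dist executing_dist m
instance (incoming_dist : List Int) (executing_dist : List Int) (m : Int) (out : List (List Int)) : Decidable (Spec_system_run incoming_dist executing_dist m out) := by unfold Spec_system_run; infer_instance

-- ===== CLAIM (what is proved, stated in full; the proofs are below) =====
def Claim_equal_system_run : Prop := ∀ (incoming_dist : List Int) (executing_dist : List Int) (m : Int), Dom_system_run incoming_dist executing_dist m → Pre_system_run incoming_dist executing_dist m → Spec_system_run incoming_dist executing_dist m (system_run incoming_dist executing_dist m)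

-- ===== LEMMAS AND PROOFS =====

-- the two folds, cut at the first k indices
def aIter (incoming_dist executing_dist : List Int) (m : Int) (k : Int) : Int × List (List Int) :=
  (PySem.List.pyRange 0 k).foldl
    (fun st j => aStep incoming_dist executing_dist m st (j, PySem.List.pyGetD incoming_dist j 0)) (0, [])

def bIter (incoming_dist executing_dist : List Int) (m : Int) (k : Int) :
    List (List Int) × List Int × Int × Int :=
  (PySem.List.pyRange 0 k).foldl (bStep incoming_dist executing_dist m) ([], [], 0, 0)

lemma system_run_eq_aIter (i e : List Int) (m : Int) :
    system_run i e m = (aIter i e m (PySem.List.len i)).2 := by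
  unfold system_run aIter
  rw [PySem.List.enumerate_eq_map_pyRange i 0, List.foldl_map]

lemma system_run_alt_eq_bIter (i e : List Int) (m : Int) :
    system_run_alt i e m = (bIter i e m (PySem.List.len i)).1 := rfl

lemma aIter_succ (i e : List Int) (m : Int) (k : Nat) :
    aIter i e m ((k : Int) + 1) =
      aStep i e m (aIter i e m k) ((k : Int), PySem.List.pyGetD i (k : Int) 0) := by
  unfold aIter
  rw [PySem.List.pyRange_one_succ_right (by positivity), List.foldl_append]
  rfl

lemma bIter_succ (i e : List Int) (m : Int) (k : Nat) :
    bIter i e m ((k : Int) + 1) = bStep i e m (bIter i e m k) (k : Int) := by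
  unfold bIter
  rw [PySem.List.pyRange_one_succ_right (by positivity), List.foldl_append]
  rfl

-- countP (≤ x) + countP (> x) = length
lemma countP_le_add_countP_gt (l : List Int) (x : Int) :
    l.countP (fun y => decide (y ≤ x)) + l.countP (fun y => decide (x < y)) = l.length := by
  induction l with
  | nil => simp
  | cons a t ih =>
    by_cases h : a ≤ x <;> simp [h, not_le.mp, not_lt.mpr] <;> omega

-- on a sorted list, bisect_right counts the elements ≤ x
lemma bisectRight_eq_countP (l : List Int) (x : Int) (h : l.Pairwise (· ≤ ·)) :
    PySem.List.bisectRight l x = l.countP (fun y => decide (y ≤ x)) := by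
  obtain ⟨hle, hlt, hgt⟩ := PySem.List.bisectRight_spec l x h
  set b := PySem.List.bisectRight l x with hb
  conv_rhs => rw [← List.take_append_drop b l]
  rw [List.countP_append]
  have h1 : (l.take b).countP (fun y => decide (y ≤ x)) = b := by
    rw [List.countP_eq_length.2, List.length_take, Nat.min_eq_left hle]
    intro a ha
    obtain ⟨i, hi, rfl⟩ := List.mem_iff_getElem.1 ha
    have hi2 := hi
    rw [List.length_take] at hi2
    simp only [List.getElem_take]
    exact decide_eq_true (hlt i (by omega) (by omega))
  have h2 : (l.drop b).countP (fun y => decide (y ≤ x)) = 0 := by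
    rw [List.countP_eq_zero]
    intro a ha
    obtain ⟨i, hi, rfl⟩ := List.mem_iff_getElem.1 ha
    have hi2 := hi
    rw [List.length_drop] at hi2
    simp only [List.getElem_drop]
    exact fun hcon => absurd (of_decide_eq_true hcon) (not_le.mpr (hgt (b + i) (by omega) (Nat.le_add_right _ _)))
  omega

-- inserting x at bisect_right keeps the list sorted; the result is a permutation of x :: l
lemma insort_sorted (l : List Int) (x : Int) (h : l.Pairwise (· ≤ ·)) :
    (PySem.List.insert l ((PySem.List.bisectRight l x : Nat) : Int) x).Pairwise (· ≤ ·) ∧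
    (PySem.List.insert l ((PySem.List.bisectRight l x : Nat) : Int) x).Perm (x :: l) := by
  obtain ⟨hle, hlt, hgt⟩ := PySem.List.bisectRight_spec l x h
  set b := PySem.List.bisectRight l x with hb
  rw [PySem.List.insert_natCast l b x hle]
  constructor
  · have h' := h
    conv at h' => rw [← List.take_append_drop b l]
    rw [List.pairwise_append] at h'
    obtain ⟨hpt, hpd, hcross⟩ := h'
    rw [List.pairwise_append]
    refine ⟨hpt, ?_, ?_⟩
    · rw [List.pairwise_cons]
      refine ⟨?_, hpd⟩
      intro a ha
      obtain ⟨i, hi, rfl⟩ := List.mem_iff_getElem.1 ha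
      have hi2 := hi
      rw [List.length_drop] at hi2
      simp only [List.getElem_drop]
      exact le_of_lt (hgt (b + i) (by omega) (Nat.le_add_right _ _))
    · intro a ha c hc
      rcases List.mem_cons.1 hc with rfl | hc
      · obtain ⟨i, hi, rfl⟩ := List.mem_iff_getElem.1 ha
        have hi2 := hi
        rw [List.length_take] at hi2
        simp only [List.getElem_take]
        exact hlt i (by omega) (by omega)
      · exact hcross a ha c hc
  · calc (List.take b l ++ x :: List.drop b l).Perm (x :: (List.take b l ++ List.drop b l)) := List.perm_middle
      _ = x :: l := by rw [List.take_append_drop]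

-- the loop invariant tying A's state to B's state after the first k steps
def LoopInv (i e : List Int) (m : Int) (k : Nat) : Prop :=
  (aIter i e m k).2 = (bIter i e m k).1 ∧
  (bIter i e m k).2.1.Pairwise (· ≤ ·) ∧
  (bIter i e m k).2.1.Perm ((aIter i e m k).2.map (fun r => PySem.List.pyGetD r 0 0)) ∧
  (bIter i e m k).2.2.1 = (i.take k).sum ∧
  (k = 0 → (aIter i e m k).2 = []) ∧
  (0 < k → ∃ rs s, (aIter i e m k).2 = rs ++ [[s, (bIter i e m k).2.2.2]])

lemma pyGetD_last_append (l : List (List Int)) (v : List Int) :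
    PySem.List.pyGetD (l ++ [v]) (-1) [] = v := by
  simp [PySem.List.pyGetD, PySem.List.pyGet?, PySem.List.pyIdx?]

lemma loopInv_zero (i e : List Int) (m : Int) : LoopInv i e m 0 := by
  unfold LoopInv aIter bIter
  simp [PySem.List.pyRange]

lemma loopInv_succ (i e : List Int) (m : Int) (k : Nat) (hk : k < i.length) (h : LoopInv i e m k) :
    LoopInv i e m (k + 1) := by
  obtain ⟨hres, hsort, hperm, hpref, _hzero, hpos⟩ := h
  have htake : (i.take (k + 1)).sum = (i.take k).sum + PySem.List.pyGetD i (k : Int) 0 := by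
    rw [PySem.List.pyGetD_natCast, List.getD_eq_getElem _ _ hk]
    exact List.sum_take_succ i k hk
  unfold LoopInv
  push_cast
  rw [aIter_succ, bIter_succ]
  by_cases hk0 : k = 0
  · subst hk0
    have hA0 : aIter i e m ((0 : Nat) : Int) = (0, []) := by
      unfold aIter; simp [PySem.List.pyRange]
    have hB0 : bIter i e m ((0 : Nat) : Int) = ([], [], 0, 0) := by
      unfold bIter; simp [PySem.List.pyRange]
    rw [show ((0:Nat):Int) = 0 from rfl] at hA0 hB0 ⊢
    rw [hA0, hB0]
    simp only [aStep, bStep]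
    set inc := PySem.List.pyGetD i (0 : Int) 0 with hinc
    set exc := PySem.List.pyGetD e (0 : Int) 0 with hexc
    obtain ⟨hs, hp⟩ := insort_sorted [] inc List.Pairwise.nil
    refine ⟨rfl, hs, ?_, ?_, by simp, fun _ => ⟨[], inc, rfl⟩⟩
    · simpa using hp
    · simpa using htake.symm
  · have hknz : ((k : Int)) ≠ 0 := Int.natCast_ne_zero.mpr hk0
    obtain ⟨rs, s, hshape⟩ := hpos (Nat.pos_of_ne_zero hk0)
    simp only [aStep, bStep, findExecTime, if_neg hknz]
    set A := aIter i e m (k : Int) with hA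
    set B := bIter i e m (k : Int) with hB
    -- the arrival time A computes is B's running prefix sum
    have harr : (PySem.List.slice i none (some (k : Int))).sum = B.2.2.1 := by
      rw [PySem.List.slice_to_natCast]; exact hpref.symm
    -- the end of the last accepted item is B's last_end
    have hlast : PySem.List.pyGetD (PySem.List.pyGetD A.2 (-1) []) 1 0 = B.2.2.2 := by
      rw [hshape, pyGetD_last_append]; rfl
    -- A's queued count equals B's binary-search count
    have hq : ((A.2.map (fun st0 => if PySem.List.pyGetD st0 0 0 > B.2.2.1 then (1 : Int) else 0)).sum)
        = (B.2.1.length : Int) - ((PySem.List.bisectRight B.2.1 B.2.2.1 : Nat) : Int) := by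
      have hL : (A.2.map (fun st0 => if PySem.List.pyGetD st0 0 0 > B.2.2.1 then (1 : Int) else 0)).sum
          = ((A.2.countP (fun st0 => decide (B.2.2.1 < PySem.List.pyGetD st0 0 0)) : Nat) : Int) := by
        rw [← PySem.List.sum_map_ite_one_zero (fun st0 => decide (B.2.2.1 < PySem.List.pyGetD st0 0 0)) A.2]
        simp [gt_iff_lt]
      have hcnt : B.2.1.countP (fun y => decide (B.2.2.1 < y))
          = A.2.countP (fun st0 => decide (B.2.2.1 < PySem.List.pyGetD st0 0 0)) := by
        rw [hperm.countP_eq, List.countP_map]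
        rfl
      have hb := bisectRight_eq_countP B.2.1 B.2.2.1 hsort
      have hle := countP_le_add_countP_gt B.2.1 B.2.2.1
      rw [hL, hb, ← hcnt]
      omega
    rw [harr, hlast, hq]
    by_cases hcond : (B.2.1.length : Int) - ((PySem.List.bisectRight B.2.1 B.2.2.1 : Nat) : Int) > m
    · -- A skips (continue); B skips too
      rw [if_pos hcond, if_pos hcond]
      refine ⟨hres, hsort, hperm, ?_, (by intro hc; exfalso; omega), fun _ => ⟨rs, s, hshape⟩⟩
      simp only [htake, hpref]
    · -- both append [start, start + exc]
      rw [if_neg hcond, if_neg hcond]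
      set start := max B.2.2.1 B.2.2.2 with hstart
      set exc := PySem.List.pyGetD e (k : Int) 0 with hexc
      obtain ⟨hs2, hp2⟩ := insort_sorted B.2.1 start hsort
      refine ⟨by rw [hres], hs2, ?_, ?_, (by intro hc; exfalso; omega), fun _ => ⟨A.2, start, by rw [hres]⟩⟩
      · refine hp2.trans ?_
        rw [List.map_append]
        have hmap1 : (([[start, start + exc]] : List (List Int)).map (fun r => PySem.List.pyGetD r 0 0)) = [start] := rfl
        rw [hmap1]
        exact (List.Perm.cons start hperm).trans (List.perm_append_singleton start _).symm
      · simp only [htake, hpref]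

lemma loopInv_all (i e : List Int) (m : Int) (k : Nat) (hk : k ≤ i.length) : LoopInv i e m k := by
  induction k with
  | zero => exact loopInv_zero i e m
  | succ n ih => exact loopInv_succ i e m n (by omega) (ih (by omega))

-- ===== VERDICT (by name: the statement is the Claim_ definition above) =====
theorem system_run_spec : Claim_equal_system_run := by
  intro i e m _ _
  unfold Spec_system_run
  rw [system_run_eq_aIter, system_run_alt_eq_bIter]
  have hlen : PySem.List.len i = (i.length : Int) := by simp [PySem.List.len]
  rw [hlen]
  exact (loopInv_all i e m i.length le_rfl).1
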